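-- pv_equiv track=rewrite | github.com/HaythemAbid/CodeSignal | matrixElementsSum.py | matrixElementsSum
-- ===== SOURCE A (Python) =====
-- def matrixElementsSum(matrix):
--     colonne = len(matrix[0])
--     echangematrix = [1 for i in range(colonne)]
--     sum = 0
--     for ligne in matrix:
--         for index in range(colonne):
--             if echangematrix[index]:
--                 if ligne[index]:
--                     sum += ligne[index]
--                 else:
--                     echangematrix[index] = 0
--     return sum
-- ===== SOURCE B (Python) =====
-- def matrixElementsSum(matrix):
--     total = 0
--     for col in range(len(matrix[0])):
--         for row in matrix:
--             v = row[col]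
--             if not v:
--                 break
--             total += v
--     return total
-- ===== Notes on version B (the rewrite author's own statement) =====
-- stated objective: simpler
-- what changed: Column-major traversal with an inner break on the first zero replaces the row-major scan that maintains a per-column active-flag list; no flag array is kept at all.
import Mathlib
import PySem

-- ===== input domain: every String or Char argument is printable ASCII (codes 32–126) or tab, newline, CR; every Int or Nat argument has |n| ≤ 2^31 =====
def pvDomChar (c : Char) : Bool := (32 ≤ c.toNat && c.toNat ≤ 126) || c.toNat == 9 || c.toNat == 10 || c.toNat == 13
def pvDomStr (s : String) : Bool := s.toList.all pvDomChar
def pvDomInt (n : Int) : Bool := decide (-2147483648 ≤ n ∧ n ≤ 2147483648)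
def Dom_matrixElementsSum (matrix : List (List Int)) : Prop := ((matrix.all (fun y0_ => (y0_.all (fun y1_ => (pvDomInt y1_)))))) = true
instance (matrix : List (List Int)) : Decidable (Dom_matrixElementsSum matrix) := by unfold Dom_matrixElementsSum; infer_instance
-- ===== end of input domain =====

-- B is a simpler column-major re-implementation (break at first zero, no flag list); return-value equivalence.

-- ===== PORT A =====
-- one step of the inner 'for index in range(colonne)' body on state (echangematrix, sum)
def pvStepA (ligne : List Int) (st : List Int × Int) (index : Nat) : List Int × Int :=
  if st.1.getD index 0 ≠ 0 then
    if ligne.getD index 0 ≠ 0 then (st.1, st.2 + ligne.getD index 0)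
    else (st.1.set index 0, st.2)
  else st

def matrixElementsSum (matrix : List (List Int)) : Int :=
  let colonne := (matrix.headD []).length   -- len(matrix[0]); Pre_ guarantees matrix ≠ []
  let echangematrix := List.replicate colonne (1 : Int)
  (matrix.foldl (fun st ligne => (List.range colonne).foldl (pvStepA ligne) st)
      (echangematrix, 0)).2

-- ===== PORT B =====
-- inner 'for row in matrix' loop for one column: add row[col] until a falsy value breaks
def pvColSum (rows : List (List Int)) (col : Nat) : Int :=
  match rows with
  | [] => 0
  | row :: rest =>
    let v := row.getD col 0
    if v = 0 then 0 else v + pvColSum rest col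

def matrixElementsSum_alt (matrix : List (List Int)) : Int :=
  (List.range (matrix.headD []).length).foldl (fun total col => total + pvColSum matrix col) 0

-- ===== PRECONDITION & SPEC =====
-- Pre_ excludes exactly the inputs where A raises IndexError: empty matrix, or some row too
-- short at a column whose flag is still active (no zero seen above it, short rows counting as
-- zero); B raises the same IndexError on exactly those inputs.
def Pre_matrixElementsSum (matrix : List (List Int)) : Prop :=
  matrix ≠ [] ∧ ∀ r < matrix.length, ∀ j < (matrix.headD []).length,
    (matrix.getD r []).length ≤ j → ∃ r' < r, (matrix.getD r' []).getD j 0 = 0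
instance (matrix : List (List Int)) : Decidable (Pre_matrixElementsSum matrix) := by
  unfold Pre_matrixElementsSum; infer_instance
def pvWitness_matrixElementsSum : List (List Int) := [[1, 2], [0, 3]]

def Spec_matrixElementsSum (matrix : List (List Int)) (out : Int) : Prop := out = matrixElementsSum_alt matrix
instance (matrix : List (List Int)) (out : Int) : Decidable (Spec_matrixElementsSum matrix out) := by unfold Spec_matrixElementsSum; infer_instance

-- ===== CLAIM (what is proved, stated in full; the proofs are below) =====
def Claim_equal_matrixElementsSum : Prop := ∀ (matrix : List (List Int)), Dom_matrixElementsSum matrix → Pre_matrixElementsSum matrix → Spec_matrixElementsSum matrix (matrixElementsSum matrix)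

-- ===== LEMMAS AND PROOFS =====

-- sum of f over 0..n-1
def pvS (n : Nat) (f : Nat → Int) : Int := ((List.range n).map f).sum

theorem pvS_succ (n : Nat) (f : Nat → Int) : pvS (n+1) f = pvS n f + f n := by
  simp [pvS, List.range_succ]

theorem pvS_congr {n : Nat} {f g : Nat → Int} (h : ∀ j, j < n → f j = g j) :
    pvS n f = pvS n g := by
  induction n with
  | zero => rfl
  | succ n ih =>
    rw [pvS_succ, pvS_succ, ih (fun j hj => h j (Nat.lt_succ_of_lt hj)), h n (Nat.lt_succ_self n)]

theorem pvS_add (n : Nat) (f g : Nat → Int) :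
    pvS n (fun j => f j + g j) = pvS n f + pvS n g := by
  induction n with
  | zero => rfl
  | succ n ih => rw [pvS_succ, pvS_succ, pvS_succ, ih]; ring

-- step lemmas
theorem stepA_flag (ligne : List Int) (st : List Int × Int) (i j : Nat) :
    (pvStepA ligne st i).1.getD j 0 =
      if st.1.getD j 0 ≠ 0 ∧ ligne.getD j 0 = 0 ∧ j = i then 0 else st.1.getD j 0 := by
  unfold pvStepA
  simp only [List.getD]
  by_cases hf : st.1[i]?.getD 0 = 0
  · by_cases hji : j = i
    · subst hji; simp [hf]
    · simp [hf, hji]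
  · by_cases hv : ligne[i]?.getD 0 = 0
    · by_cases hji : j = i
      · subst hji
        have hlen : j < st.1.length := by
          by_contra hge
          rw [List.getElem?_eq_none (Nat.le_of_not_lt hge)] at hf
          exact hf rfl
        have hx : st.1[j] ≠ 0 := by
          rw [List.getElem?_eq_getElem hlen] at hf; simpa using hf
        simp [hx, hv, List.getElem?_set_self, hlen]
      · simp [hf, hv, List.getElem?_set_ne (fun h => hji h.symm), hji]
    · by_cases hji : j = i
      · subst hji; simp [hf, hv]
      · simp [hf, hv, hji]

theorem stepA_sum (ligne : List Int) (st : List Int × Int) (i : Nat) :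
    (pvStepA ligne st i).2 =
      st.2 + (if st.1.getD i 0 ≠ 0 ∧ ligne.getD i 0 ≠ 0 then ligne.getD i 0 else 0) := by
  unfold pvStepA
  simp only [List.getD]
  by_cases hf : st.1[i]?.getD 0 = 0 <;> by_cases hv : ligne[i]?.getD 0 = 0 <;> simp [hf, hv]

-- inner-fold characterisations
theorem innerA_flag (ligne : List Int) (n : Nat) (st : List Int × Int) (j : Nat) :
    ((List.range n).foldl (pvStepA ligne) st).1.getD j 0 =
      if st.1.getD j 0 ≠ 0 ∧ ligne.getD j 0 = 0 ∧ j < n then 0 else st.1.getD j 0 := by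
  induction n generalizing st with
  | zero => simp
  | succ n ih =>
    rw [List.range_succ, List.foldl_append, List.foldl_cons, List.foldl_nil, stepA_flag, ih]
    by_cases hf : st.1.getD j 0 ≠ 0 <;> by_cases hv : ligne.getD j 0 = 0 <;>
      by_cases hjn : j < n <;> by_cases hje : j = n <;>
      simp_all [Nat.lt_succ_iff_lt_or_eq] <;> (try split_ifs) <;>
      first | rfl | omega | (intro h; exact absurd h (by omega))

theorem innerA_sum (ligne : List Int) (n : Nat) (st : List Int × Int) :
    ((List.range n).foldl (pvStepA ligne) st).2 =
      st.2 + pvS n (fun j => if st.1.getD j 0 ≠ 0 ∧ ligne.getD j 0 ≠ 0 then ligne.getD j 0 else 0) := by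
  induction n generalizing st with
  | zero => simp [pvS]
  | succ n ih =>
    rw [List.range_succ, List.foldl_append, List.foldl_cons, List.foldl_nil, stepA_sum, ih,
      innerA_flag, pvS_succ]
    by_cases hf : st.1.getD n 0 ≠ 0 <;> by_cases hv : ligne.getD n 0 ≠ 0 <;>
      simp [hf, hv] <;> ring

-- outer loop: flags select the per-column break-sums of the remaining rows
theorem outerA (colonne : Nat) (rows : List (List Int)) (st : List Int × Int) :
    ((rows.foldl (fun st ligne => (List.range colonne).foldl (pvStepA ligne) st) st)).2 =
      st.2 + pvS colonne (fun j => if st.1.getD j 0 ≠ 0 then pvColSum rows j else 0) := by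
  induction rows generalizing st with
  | nil =>
    simp only [List.foldl_nil, pvColSum]
    have : pvS colonne (fun j => if st.1.getD j 0 ≠ 0 then (0:Int) else 0) = 0 := by
      rw [pvS_congr (g := fun _ => (0:Int)) (fun j _ => by split <;> rfl)]
      simp [pvS]
    omega
  | cons row rest ih =>
    rw [List.foldl_cons, ih, innerA_sum]
    have hflag := innerA_flag row colonne st
    rw [add_assoc]
    congr 1
    rw [← pvS_add]
    apply pvS_congr
    intro j hj
    rw [hflag j]
    simp only [pvColSum]
    split_ifs <;> first | rfl | omega | tauto | simp_all

-- B's fold over range is pvS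
theorem foldB (n : Nat) (f : Nat → Int) (acc : Int) :
    (List.range n).foldl (fun t c => t + f c) acc = acc + pvS n f := by
  induction n generalizing acc with
  | zero => simp [pvS]
  | succ n ih =>
    rw [List.range_succ, List.foldl_append, List.foldl_cons, List.foldl_nil, ih, pvS_succ]
    ring

-- ===== VERDICT (by name: the statement is the Claim_ definition above) =====
theorem matrixElementsSum_spec : Claim_equal_matrixElementsSum := by
  intro matrix _ _
  unfold Spec_matrixElementsSum matrixElementsSum matrixElementsSum_alt
  rw [outerA, foldB]
  simp only [zero_add]
  apply pvS_congr
  intro j hj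
  rw [List.getD_replicate 1 hj]
  norm_num
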